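-- pv_equiv track=rewrite | github.com/lin432/University-Work | CSCA48/assignment 2/regex_functions.py | _construct_pair_helper
-- ===== SOURCE A (Python) =====
-- def _construct_pair_helper(i_str, i_br, s, l_bracket, r_bracket):
--     '''(int, int, str, ([int],[int]), str) -> str
--     takes all of the info above and inserts brackets at the next
--     binary available from i_str to string s
--
--     >>>_construct_pair_helper(0, 0, '1|e', ([1], [0, 1]), '')
--     '(1|e)'
--
--     REQ: i_str < len(s)
--     '''
--     # checks whether we still have brackets to add
--     if(i_br < (len(r_bracket))):
--         # initializes binary list and string
--         binary = {'.', '|'}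
--         string = s
--
--         # tries to find next binary location
--         i_bin = i_str
--         right_add = r_bracket[(i_br - 1)]
--         left_add = 0
--         while(s[i_bin] not in binary):
--             i_bin += 1
--         string = s[:i_bin] + (')' * right_add) + s[i_bin]
--         if(i_br < len(l_bracket)):
--             left_add = l_bracket[i_br]
--             string += '(' * left_add
--         if((i_bin + 1) < len(s)):
--             string += s[(i_bin + 1):]
--
--         i_str = i_bin + left_add + right_add + 1
--         s = _construct_pair_helper(i_str, (i_br + 1), string, l_bracket,
--                                    r_bracket)
--
--     return s
-- ===== SOURCE B (Python) =====
-- def _construct_pair_helper(i_str, i_br, s, l_bracket, r_bracket):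
--     # One pass over the ORIGINAL string: collect pieces of s interleaved with the
--     # inserted parentheses and join once at the end, instead of rebuilding and
--     # rescanning the string at every binary operator.
--     pieces = []
--     prev = 0
--     i = i_str
--     k = i_br
--     while k < len(r_bracket):
--         while s[i] not in ('.', '|'):
--             i += 1
--         pieces.append(s[prev:i])
--         pieces.append(')' * r_bracket[k - 1])
--         pieces.append(s[i])
--         if k < len(l_bracket):
--             pieces.append('(' * l_bracket[k])
--         prev = i = i + 1
--         k += 1
--     pieces.append(s[prev:])
--     return ''.join(pieces)
-- ===== Notes on version B (the rewrite author's own statement) =====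
-- stated objective: alternative
-- what changed: A rebuilds the whole string and rescans it recursively at every binary operator; B makes one pass over the original string, collecting the untouched pieces and the inserted parenthesis runs into a list and joining once at the end.
-- outside the precondition, e.g. on _construct_pair_helper(-2, 0, 'a.|', [2, 1, 1], [2, 1, 0]): A returns 'a)).((()|(', B returns 'a.(())|(a).(|'; on _construct_pair_helper(0, -1, 'ab||.', [2, 1, 0], [1, 1]): A returns 'ab)|)|(().(', B returns 'ab)|)|(().('; on _construct_pair_helper(0, 0, '|b|bb', [0, -1, 0], [1, -1]): A returns ')|b|bb', B returns '|b)|bb'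
import Mathlib
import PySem

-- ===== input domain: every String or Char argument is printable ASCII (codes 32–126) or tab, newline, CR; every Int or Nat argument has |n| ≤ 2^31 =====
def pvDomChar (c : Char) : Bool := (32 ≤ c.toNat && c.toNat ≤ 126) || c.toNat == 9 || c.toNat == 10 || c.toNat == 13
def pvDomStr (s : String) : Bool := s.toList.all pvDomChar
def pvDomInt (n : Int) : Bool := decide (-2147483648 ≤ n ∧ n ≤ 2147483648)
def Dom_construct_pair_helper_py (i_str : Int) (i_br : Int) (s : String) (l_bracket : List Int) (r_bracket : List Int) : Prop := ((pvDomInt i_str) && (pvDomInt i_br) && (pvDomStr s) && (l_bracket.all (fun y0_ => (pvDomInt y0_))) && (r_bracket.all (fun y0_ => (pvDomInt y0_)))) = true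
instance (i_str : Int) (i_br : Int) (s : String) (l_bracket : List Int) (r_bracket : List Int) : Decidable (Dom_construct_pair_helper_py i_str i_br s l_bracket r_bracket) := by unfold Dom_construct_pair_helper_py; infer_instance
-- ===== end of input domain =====

-- B rebuilds the output in ONE pass over the original string (collecting pieces and joining once)
-- instead of A's rebuild-and-rescan recursion at every binary operator; objective: alternative decomposition.
-- Pre_ excludes the inputs where A raises IndexError (too few '.'/'|' operators ahead, or a bracket index
-- out of range) and, in the bracket-inserting case, negative i_str / i_br / bracket counts, where A's
-- rescanning of the rebuilt string and Python's negative-index wraparound give accidental results.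

-- `c in {'.', '|'}`
def pvIsBin (c : Char) : Bool := c == '.' || c == '|'

-- the shared inner `while s[i] not in binary: i += 1` loop of both Pythons: first index ≥ i holding a
-- binary operator; none = Python's IndexError (fuel counts the at most len-i+1 probes before s[i] raises)
def pvScan (cs : List Char) : Nat → Int → Option Int
  | 0, _ => none
  | fuel + 1, i =>
    match PySem.List.pyGet? cs i with
    | none => none
    | some c => if pvIsBin c then some i else pvScan cs fuel (i + 1)

-- ===== PORT A =====
def construct_pair_helper_py (i_str : Int) (i_br : Int) (s : String) (l_bracket : List Int) (r_bracket : List Int) : String :=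
  if _h : i_br < (r_bracket.length : Int) then
    let cs := s.toList
    -- right_add = r_bracket[i_br - 1]  (IndexError → excluded by Pre_)
    let right_add := (PySem.List.pyGet? r_bracket (i_br - 1)).getD 0
    match pvScan cs (((cs.length : Int) - i_str).toNat + 1) i_str with
    | none => s  -- IndexError in Python (excluded by Pre_)
    | some i_bin =>
      let c := (PySem.List.pyGet? cs i_bin).getD ' '
      let left_add : Int := if i_br < (l_bracket.length : Int) then (PySem.List.pyGet? l_bracket i_br).getD 0 else 0
      let string := PySem.List.slice cs none (some i_bin) ++ List.replicate right_add.toNat ')' ++ [c]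
        ++ (if i_br < (l_bracket.length : Int) then List.replicate left_add.toNat '(' else [])
        ++ (if i_bin + 1 < (cs.length : Int) then PySem.List.slice cs (some (i_bin + 1)) none else [])
      construct_pair_helper_py (i_bin + left_add + right_add + 1) (i_br + 1) (String.ofList string) l_bracket r_bracket
  else s
termination_by ((r_bracket.length : Int) - i_br).toNat
decreasing_by omega

-- ===== PORT B =====
-- B's while loop: pieces of the ORIGINAL cs interleaved with inserted parentheses, joined at the end
def pvPiecesLoop (l_bracket r_bracket : List Int) (cs : List Char) (pieces : List Char) (prev i k : Int) : List Char :=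
  if _h : k < (r_bracket.length : Int) then
    match pvScan cs (((cs.length : Int) - i).toNat + 1) i with
    | none => pieces  -- IndexError in Python (excluded by Pre_)
    | some ib =>
      pvPiecesLoop l_bracket r_bracket cs
        (pieces ++ PySem.List.slice cs (some prev) (some ib)
          ++ List.replicate ((PySem.List.pyGet? r_bracket (k - 1)).getD 0).toNat ')'
          ++ [(PySem.List.pyGet? cs ib).getD ' ']
          ++ (if k < (l_bracket.length : Int) then List.replicate ((PySem.List.pyGet? l_bracket k).getD 0).toNat '(' else []))
        (ib + 1) (ib + 1) (k + 1)
  else pieces ++ PySem.List.slice cs (some prev) none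
termination_by ((r_bracket.length : Int) - k).toNat
decreasing_by omega

def construct_pair_helper_py_alt (i_str : Int) (i_br : Int) (s : String) (l_bracket : List Int) (r_bracket : List Int) : String :=
  String.ofList (pvPiecesLoop l_bracket r_bracket s.toList [] 0 i_str i_br)

-- ===== PRECONDITION & SPEC =====
-- Pre_ excludes inputs where A raises (too few binary operators ahead of i_str, or an out-of-range
-- bracket index), and — only in the bracket-inserting case i_br < len(r_bracket) — inputs with negative
-- i_str, i_br or bracket counts, on which A may still return but via negative-index wraparound and
-- rescans of the rebuilt string that are accidents of A's implementation (see claim cites).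
def Pre_construct_pair_helper_py (i_str : Int) (i_br : Int) (s : String) (l_bracket : List Int) (r_bracket : List Int) : Prop :=
  (r_bracket.length : Int) ≤ i_br ∨
  (0 ≤ i_str ∧ 0 ≤ i_br ∧ (∀ x ∈ l_bracket, 0 ≤ x) ∧ (∀ x ∈ r_bracket, 0 ≤ x) ∧
    (r_bracket.length : Int) - i_br ≤ ((s.toList.drop i_str.toNat).countP pvIsBin : Int))
instance (i_str : Int) (i_br : Int) (s : String) (l_bracket : List Int) (r_bracket : List Int) : Decidable (Pre_construct_pair_helper_py i_str i_br s l_bracket r_bracket) := by unfold Pre_construct_pair_helper_py; infer_instance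

def pvWitness_construct_pair_helper_py : Int × Int × String × List Int × List Int := (0, 0, "a|b", [1], [2])

def Spec_construct_pair_helper_py (i_str : Int) (i_br : Int) (s : String) (l_bracket : List Int) (r_bracket : List Int) (out : String) : Prop := out = construct_pair_helper_py_alt i_str i_br s l_bracket r_bracket
instance (i_str : Int) (i_br : Int) (s : String) (l_bracket : List Int) (r_bracket : List Int) (out : String) : Decidable (Spec_construct_pair_helper_py i_str i_br s l_bracket r_bracket out) := by unfold Spec_construct_pair_helper_py; infer_instance

-- ===== CLAIM (what is proved, stated in full; the proofs are below) =====
def Claim_equal_construct_pair_helper_py : Prop := ∀ (i_str : Int) (i_br : Int) (s : String) (l_bracket : List Int) (r_bracket : List Int), Dom_construct_pair_helper_py i_str i_br s l_bracket r_bracket → Pre_construct_pair_helper_py i_str i_br s l_bracket r_bracket → Spec_construct_pair_helper_py i_str i_br s l_bracket r_bracket (construct_pair_helper_py i_str i_br s l_bracket r_bracket)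

-- ===== LEMMAS AND PROOFS =====

-- common functional skeleton both ports are reduced to: process the next n binary operators of the
-- suffix `suf`, threading the Python bracket-index expressions unchanged
def pvSpecF (l_bracket r_bracket : List Int) : Nat → Int → List Char → List Char
  | 0, _, suf => suf
  | n + 1, k, suf =>
    match suf.findIdx? pvIsBin with
    | none => suf  -- unreachable under the count condition
    | some j =>
      suf.take j ++ List.replicate ((PySem.List.pyGet? r_bracket (k - 1)).getD 0).toNat ')'
        ++ [suf.getD j ' ']
        ++ (if k < (l_bracket.length : Int) then List.replicate ((PySem.List.pyGet? l_bracket k).getD 0).toNat '(' else [])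
        ++ pvSpecF l_bracket r_bracket n (k + 1) (suf.drop (j + 1))

theorem pvScan_eq (cs : List Char) : ∀ fuel (p : Nat), cs.length - p < fuel →
    pvScan cs fuel (p : Int) = ((cs.drop p).findIdx? pvIsBin).map (fun j => ((p + j : Nat) : Int)) := by
  intro fuel
  induction fuel with
  | zero => intro p h; omega
  | succ fuel ih =>
    intro p h
    rw [pvScan]
    rw [PySem.List.pyGet?_natCast]
    by_cases hp : p < cs.length
    · rw [List.drop_eq_getElem_cons hp]
      simp only [List.getElem?_eq_getElem hp, List.findIdx?_cons]
      by_cases hbin : pvIsBin cs[p]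
      · simp [hbin]
      · simp only [hbin, Bool.false_eq_true, ite_false, Option.map_map]
        have hc : ((p : Int) + 1) = ((p + 1 : Nat) : Int) := by push_cast; ring
        rw [hc, ih (p + 1) (by omega)]
        congr 1
        funext j
        simp; omega
    · simp only [List.getElem?_eq_none (by omega : cs.length ≤ p)]
      rw [List.drop_eq_nil_of_le (by omega)]
      simp

theorem pvFindBin_spec (xs : List Char) (h : 0 < xs.countP pvIsBin) :
    ∃ j, xs.findIdx? pvIsBin = some j ∧ j < xs.length ∧
      xs.countP pvIsBin = (xs.drop (j + 1)).countP pvIsBin + 1 := by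
  induction xs with
  | nil => simp at h
  | cons a t ih =>
    by_cases hb : pvIsBin a
    · exact ⟨0, by simp [List.findIdx?_cons, hb]⟩
    · rw [List.countP_cons, if_neg (by simp [hb])] at h
      obtain ⟨j, hf, hlt, hc⟩ := ih h
      refine ⟨j + 1, ?_, by simp; omega, ?_⟩
      · simp [List.findIdx?_cons, hb, hf]
      · simp only [List.drop_succ_cons, List.countP_cons, if_neg (by simp [hb] : ¬ (pvIsBin a = true))]
        omega

theorem pvPortA_spec (l_bracket r_bracket : List Int)
    (hl : ∀ x ∈ l_bracket, 0 ≤ x) (hr : ∀ x ∈ r_bracket, 0 ≤ x) :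
    ∀ (n : Nat) (i_br : Int) (i_str : Nat) (cs : List Char),
      0 ≤ i_br → i_br + n = (r_bracket.length : Int) →
      n ≤ (cs.drop i_str).countP pvIsBin →
      (construct_pair_helper_py (i_str : Int) i_br (String.ofList cs) l_bracket r_bracket).toList
        = cs.take i_str ++ pvSpecF l_bracket r_bracket n i_br (cs.drop i_str) := by
  intro n
  induction n with
  | zero =>
    intro i_br i_str cs hb hk _
    rw [construct_pair_helper_py, dif_neg (by omega : ¬ i_br < (r_bracket.length : Int))]
    rw [String.toList_ofList, pvSpecF, List.take_append_drop]
  | succ n ih =>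
    intro i_br i_str cs hb hk hcnt
    rw [construct_pair_helper_py, dif_pos (by omega : i_br < (r_bracket.length : Int))]
    simp only [String.toList_ofList]
    rw [pvScan_eq cs _ i_str (by omega)]
    obtain ⟨j, hf, hlt, hc⟩ := pvFindBin_spec (cs.drop i_str) (by omega)
    rw [hf]
    simp only [Option.map_some]
    have hij : i_str + j < cs.length := by
      rw [List.length_drop] at hlt; omega
    have hra : 0 ≤ (PySem.List.pyGet? r_bracket (i_br - 1)).getD 0 := by
      rcases hg : PySem.List.pyGet? r_bracket (i_br - 1) with _ | x
      · simp
      · simpa using hr x (PySem.List.mem_of_pyGet?_eq_some _ hg)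
    set ra := (PySem.List.pyGet? r_bracket (i_br - 1)).getD 0 with hra_def
    set la : Int := if i_br < (l_bracket.length : Int) then (PySem.List.pyGet? l_bracket i_br).getD 0 else 0 with hla_def
    set L : List Char := if i_br < (l_bracket.length : Int) then List.replicate la.toNat '(' else [] with hL_def
    have hla0 : 0 ≤ la := by
      rw [hla_def]; split_ifs with hcond
      · rcases hg : PySem.List.pyGet? l_bracket i_br with _ | x
        · simp
        · simpa using hl x (PySem.List.mem_of_pyGet?_eq_some _ hg)
      · exact le_refl 0
    have hLlen : L.length = la.toNat := by
      rw [hL_def]; split_ifs with hcond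
      · simp
      · rw [hla_def, if_neg hcond]; rfl
    have hdd : cs.drop (i_str + j + 1) = (cs.drop i_str).drop (j + 1) := by
      rw [List.drop_drop, show i_str + (j + 1) = i_str + j + 1 from by omega]
    have htail : (if ((i_str + j : Nat) : Int) + 1 < (cs.length : Int) then PySem.List.slice cs (some (((i_str + j : Nat) : Int) + 1)) none else [])
        = cs.drop (i_str + j + 1) := by
      split_ifs with hcond
      · rw [show ((i_str + j : Nat) : Int) + 1 = ((i_str + j + 1 : Nat) : Int) from by push_cast; ring,
          PySem.List.slice_from_natCast]
      · rw [List.drop_eq_nil_of_le (by omega)]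
    rw [PySem.List.slice_to_natCast, htail]
    set c := (PySem.List.pyGet? cs ((i_str + j : Nat) : Int)).getD ' ' with hc_def
    set P : List Char := cs.take (i_str + j) ++ List.replicate ra.toNat ')' ++ [c] ++ L with hP_def
    have hPlen : P.length = i_str + j + ra.toNat + 1 + la.toNat := by
      simp [hP_def, hLlen]; omega
    have harg : ((i_str + j : Nat) : Int) + la + ra + 1 = ((i_str + j + ra.toNat + 1 + la.toNat : Nat) : Int) := by
      push_cast [Int.toNat_of_nonneg hra, Int.toNat_of_nonneg hla0]; ring
    have hSdrop : (P ++ cs.drop (i_str + j + 1)).drop (i_str + j + ra.toNat + 1 + la.toNat) = cs.drop (i_str + j + 1) :=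
      List.drop_left' hPlen
    have hStake : (P ++ cs.drop (i_str + j + 1)).take (i_str + j + ra.toNat + 1 + la.toNat) = P :=
      List.take_left' hPlen
    have hrec := ih (i_br + 1) (i_str + j + ra.toNat + 1 + la.toNat) (P ++ cs.drop (i_str + j + 1))
      (by omega) (by push_cast at hk ⊢; omega) (by rw [hSdrop, hdd]; omega)
    rw [hStake, hSdrop] at hrec
    rw [harg, hrec]
    rw [pvSpecF]
    simp only [hf]
    have hch : c = (cs.drop i_str).getD j ' ' := by
      rw [hc_def, PySem.List.pyGet?_natCast, List.getD_eq_getElem?_getD, List.getElem?_drop]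
    have hL2 : (if i_br < (l_bracket.length : Int) then List.replicate ((PySem.List.pyGet? l_bracket i_br).getD 0).toNat '(' else []) = L := by
      rw [hL_def]; split_ifs with hcond
      · rw [hla_def, if_pos hcond]
      · rfl
    rw [hL2, ← hra_def, ← hch]
    rw [hP_def, List.take_add]
    simp [List.append_assoc, hdd]

theorem pvPortB_spec (l_bracket r_bracket : List Int) (cs : List Char) :
    ∀ (n : Nat) (k : Int) (prev i : Nat) (pieces : List Char),
      prev ≤ i → k + n = (r_bracket.length : Int) →
      n ≤ (cs.drop i).countP pvIsBin →
      pvPiecesLoop l_bracket r_bracket cs pieces (prev : Int) (i : Int) k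
        = pieces ++ (cs.drop prev).take (i - prev) ++ pvSpecF l_bracket r_bracket n k (cs.drop i) := by
  intro n
  induction n with
  | zero =>
    intro k prev i pieces hpi hk _
    rw [pvPiecesLoop, dif_neg (by omega : ¬ k < (r_bracket.length : Int))]
    rw [PySem.List.slice_from_natCast, pvSpecF]
    have hdi : cs.drop i = (cs.drop prev).drop (i - prev) := by
      rw [List.drop_drop, show prev + (i - prev) = i from by omega]
    rw [hdi, List.append_assoc, List.take_append_drop]
  | succ n ih =>
    intro k prev i pieces hpi hk hcnt
    rw [pvPiecesLoop, dif_pos (by omega : k < (r_bracket.length : Int))]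
    rw [pvScan_eq cs _ i (by omega)]
    obtain ⟨j, hf, hlt, hc⟩ := pvFindBin_spec (cs.drop i) (by omega)
    rw [hf]
    simp only [Option.map_some]
    have hcast : ((i + j : Nat) : Int) + 1 = ((i + j + 1 : Nat) : Int) := by push_cast; ring
    have hdd : cs.drop (i + j + 1) = (cs.drop i).drop (j + 1) := by
      rw [List.drop_drop, show i + (j + 1) = i + j + 1 from by omega]
    rw [hcast, ih (k + 1) (i + j + 1) (i + j + 1) _ le_rfl (by omega)
      (by rw [hdd]; omega)]
    rw [pvSpecF, hf]
    have htk : PySem.List.slice cs (some (prev : Int)) (some ((i + j : Nat) : Int))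
        = (cs.drop prev).take (i - prev) ++ (cs.drop i).take j := by
      rw [PySem.List.slice_natCast]
      have h1 : i + j - prev = (i - prev) + j := by omega
      rw [h1, List.take_add]
      congr 2
      rw [List.drop_drop, show prev + (i - prev) = i from by omega]
    have hch : (PySem.List.pyGet? cs ((i + j : Nat) : Int)).getD ' ' = (cs.drop i).getD j ' ' := by
      rw [PySem.List.pyGet?_natCast, List.getD_eq_getElem?_getD, List.getElem?_drop]
    rw [htk, hch]
    have hjj : i + (j + 1) = i + j + 1 := by omega
    simp [List.append_assoc, hjj]

-- ===== VERDICT (by name: the statement is the Claim_ definition above) =====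
theorem construct_pair_helper_py_spec : Claim_equal_construct_pair_helper_py := by
  intro i_str i_br s l_bracket r_bracket _ hpre
  unfold Spec_construct_pair_helper_py construct_pair_helper_py_alt
  by_cases hge : (r_bracket.length : Int) ≤ i_br
  · -- immediate return: A returns s, B returns join [s[0:]] = s
    rw [construct_pair_helper_py, pvPiecesLoop]
    simp only [dif_neg (by omega : ¬ i_br < (r_bracket.length : Int))]
    rw [PySem.List.slice_zero_start, PySem.List.slice_none_none]
    simp [String.ofList_toList]
  · rcases hpre with h | ⟨hs, hb, hl, hr, hcnt⟩
    · omega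
    · obtain ⟨m, rfl⟩ : ∃ m : Nat, i_str = (m : Int) := ⟨i_str.toNat, by omega⟩
      have hb' : i_br + (((r_bracket.length : Int) - i_br).toNat : Nat) = (r_bracket.length : Int) := by omega
      have hcnt' : (((r_bracket.length : Int) - i_br).toNat : Nat) ≤ (s.toList.drop m).countP pvIsBin := by
        simp only [Int.toNat_natCast] at hcnt ⊢; omega
      have hA := pvPortA_spec l_bracket r_bracket hl hr _ i_br m s.toList hb hb' hcnt'
      have hB := pvPortB_spec l_bracket r_bracket s.toList _ i_br 0 m [] (Nat.zero_le _) hb' hcnt'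
      rw [String.ofList_toList] at hA
      apply String.toList_injective
      rw [hA, String.toList_ofList]
      simp only [Nat.cast_zero] at hB
      rw [hB]
      simp
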